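-- pv_equiv track=rewrite | github.com/chenxi840221/ihacpa-v2 | src/core/browser_automation.py | _determine_max_severity
-- ===== SOURCE A (Python) =====
-- from typing import Dict, List, Optional, Any, Tuple
--
-- def _determine_max_severity(severities: List[str]) -> str:
--     """Determine the maximum severity from a list"""
--     severity_order = {'CRITICAL': 4, 'HIGH': 3, 'MEDIUM': 2, 'LOW': 1, 'UNKNOWN': 0}
--
--     max_severity = 'UNKNOWN'
--     max_value = 0
--
--     for severity in severities:
--         severity = severity.upper()
--         for sev_key in severity_order:
--             if sev_key in severity:
--                 if severity_order[sev_key] > max_value: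
--                     max_value = severity_order[sev_key]
--                     max_severity = sev_key
--                 break
--
--     return max_severity
-- ===== SOURCE B (Python) =====
-- def _determine_max_severity(severities):
--     ups = [s.upper() for s in severities]
--     for key in ('CRITICAL', 'HIGH', 'MEDIUM', 'LOW'):
--         if any(key in u for u in ups):
--             return key
--     return 'UNKNOWN'
-- ===== Notes on version B (the rewrite author's own statement) =====
-- stated objective: simpler
-- what changed: Replaces the per-string max-accumulator (with an inner break-on-first-match key scan) by a level-major early-return scan: for each severity level from highest to lowest, return it as soon as any uppercased string contains it.
import Mathlib
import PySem

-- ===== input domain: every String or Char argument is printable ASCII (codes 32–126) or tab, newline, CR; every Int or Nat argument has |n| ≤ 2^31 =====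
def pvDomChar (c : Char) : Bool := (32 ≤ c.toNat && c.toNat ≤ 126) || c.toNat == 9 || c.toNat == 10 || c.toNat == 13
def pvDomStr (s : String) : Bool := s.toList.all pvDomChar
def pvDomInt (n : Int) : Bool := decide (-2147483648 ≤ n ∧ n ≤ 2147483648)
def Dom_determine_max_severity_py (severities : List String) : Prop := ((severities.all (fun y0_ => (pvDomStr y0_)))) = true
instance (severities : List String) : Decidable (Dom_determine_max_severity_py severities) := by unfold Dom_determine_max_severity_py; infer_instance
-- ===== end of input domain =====

-- B replaces A's per-string max-accumulator by a level-major early-return scan; objective: simpler.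
-- ===== PORT A =====
-- inner 'for sev_key in severity_order: ... break' loop of A
def pvInnerA (d : PySem.Dict String Int) (keys : List String) (sev : String)
    (st : String × Int) : String × Int :=
  match keys with
  | [] => st
  | k :: rest =>
    if PySem.Str.isIn k sev then
      (if d.getD k 0 > st.2 then (k, d.getD k 0) else st)
    else pvInnerA d rest sev st

def determine_max_severity_py (severities : List String) : String :=
  let severity_order : PySem.Dict String Int :=
    PySem.Dict.ofList [("CRITICAL", 4), ("HIGH", 3), ("MEDIUM", 2), ("LOW", 1), ("UNKNOWN", 0)]
  (severities.foldl
    (fun st severity => pvInnerA severity_order severity_order.keys (PySem.Str.upper severity) st)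
    ("UNKNOWN", 0)).1

-- ===== PORT B =====
-- level-major scan: first key (highest first) contained in any uppercased string
def pvScanB (keys : List String) (ups : List String) : String :=
  match keys with
  | [] => "UNKNOWN"
  | k :: rest =>
    if ups.any (fun u => PySem.Str.isIn k u) then k else pvScanB rest ups

def determine_max_severity_py_alt (severities : List String) : String :=
  pvScanB ["CRITICAL", "HIGH", "MEDIUM", "LOW"] (severities.map (fun s => PySem.Str.upper s))

-- ===== PRECONDITION & SPEC =====
def Spec_determine_max_severity_py (severities : List String) (out : String) : Prop := out = determine_max_severity_py_alt severities
instance (severities : List String) (out : String) : Decidable (Spec_determine_max_severity_py severities out) := by unfold Spec_determine_max_severity_py; infer_instance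

-- ===== CLAIM (what is proved, stated in full; the proofs are below) =====
def Claim_equal_determine_max_severity_py : Prop := ∀ (severities : List String), Dom_determine_max_severity_py severities → Spec_determine_max_severity_py severities (determine_max_severity_py severities)

-- ===== LEMMAS AND PROOFS =====

def pvD0 : PySem.Dict String Int :=
  PySem.Dict.ofList [("CRITICAL", 4), ("HIGH", 3), ("MEDIUM", 2), ("LOW", 1), ("UNKNOWN", 0)]

def pvKeys0 : List String := ["CRITICAL", "HIGH", "MEDIUM", "LOW", "UNKNOWN"]

-- the severity level a single (uppercased) string contributes
def pvLvl (u : String) : Int :=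
  if PySem.Str.isIn "CRITICAL" u then 4
  else if PySem.Str.isIn "HIGH" u then 3
  else if PySem.Str.isIn "MEDIUM" u then 2
  else if PySem.Str.isIn "LOW" u then 1
  else 0

def pvName (v : Int) : String :=
  if v = 4 then "CRITICAL" else if v = 3 then "HIGH" else if v = 2 then "MEDIUM"
  else if v = 1 then "LOW" else "UNKNOWN"

lemma pvLvl_le_four (u : String) : pvLvl u ≤ 4 := by
  unfold pvLvl; split_ifs <;> norm_num

lemma pvA_unfold (xs : List String) :
    determine_max_severity_py xs =
      (xs.foldl (fun st s => pvInnerA pvD0 pvKeys0 (PySem.Str.upper s) st) ("UNKNOWN", 0)).1 := rfl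

lemma pvStep (sev : String) (v : Int) (hv : 0 ≤ v) :
    pvInnerA pvD0 pvKeys0 sev (pvName v, v) = (pvName (max v (pvLvl sev)), max v (pvLvl sev)) := by
  have h4 : pvD0.getD "CRITICAL" 0 = 4 := rfl
  have h3 : pvD0.getD "HIGH" 0 = 3 := rfl
  have h2 : pvD0.getD "MEDIUM" 0 = 2 := rfl
  have h1 : pvD0.getD "LOW" 0 = 1 := rfl
  have h0 : pvD0.getD "UNKNOWN" 0 = 0 := rfl
  simp only [pvKeys0, pvInnerA, pvLvl, h4, h3, h2, h1, h0]
  split_ifs <;>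
    first
      | omega
      | (rw [max_eq_right (by omega)]; try rfl)
      | (rw [max_eq_left (by omega)]; try rfl)

lemma pvFoldA (xs : List String) (v : Int) (hv : 0 ≤ v) :
    xs.foldl (fun st s => pvInnerA pvD0 pvKeys0 (PySem.Str.upper s) st) (pvName v, v)
      = (pvName (xs.foldl (fun m s => max m (pvLvl (PySem.Str.upper s))) v),
         xs.foldl (fun m s => max m (pvLvl (PySem.Str.upper s))) v) := by
  induction xs generalizing v with
  | nil => rfl
  | cons s xs ih =>
    simp only [List.foldl_cons]
    rw [pvStep _ _ hv, ih _ (le_trans hv (le_max_left _ _))]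

lemma pvLe_foldMax (xs : List String) (v : Int) :
    v ≤ xs.foldl (fun m s => max m (pvLvl (PySem.Str.upper s))) v := by
  induction xs generalizing v with
  | nil => simp
  | cons s xs ih => exact le_trans (le_max_left _ _) (ih _)

lemma pvMem_le_foldMax (xs : List String) (v : Int) (s : String) (hs : s ∈ xs) :
    pvLvl (PySem.Str.upper s) ≤ xs.foldl (fun m t => max m (pvLvl (PySem.Str.upper t))) v := by
  induction xs generalizing v with
  | nil => cases hs
  | cons t xs ih =>
    rw [List.mem_cons] at hs
    rcases hs with rfl | h
    · exact le_trans (le_max_right _ _) (pvLe_foldMax _ _)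
    · exact ih _ h

lemma pvFoldMax_le (xs : List String) (v ub : Int) (hv : v ≤ ub)
    (h : ∀ s ∈ xs, pvLvl (PySem.Str.upper s) ≤ ub) :
    xs.foldl (fun m s => max m (pvLvl (PySem.Str.upper s))) v ≤ ub := by
  induction xs generalizing v with
  | nil => exact hv
  | cons s xs ih =>
    apply ih <;>
      first
        | exact max_le hv (h s List.mem_cons_self)
        | exact fun t ht => h t (List.mem_cons_of_mem _ ht)

lemma pvScanB_eq (xs : List String) :
    pvScanB ["CRITICAL", "HIGH", "MEDIUM", "LOW"] (xs.map (fun s => PySem.Str.upper s))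
      = pvName (xs.foldl (fun m s => max m (pvLvl (PySem.Str.upper s))) 0) := by
  simp only [pvScanB, List.any_map, List.any_eq_true, Function.comp]
  split_ifs with c4 c3 c2 c1
  · obtain ⟨s, hs, hc⟩ := c4
    have hl : pvLvl (PySem.Str.upper s) = 4 := by unfold pvLvl; rw [if_pos hc]
    have hle := pvMem_le_foldMax xs 0 s hs
    have hub := pvFoldMax_le xs 0 4 (by norm_num) (fun t _ => pvLvl_le_four _)
    rw [show xs.foldl (fun m s => max m (pvLvl (PySem.Str.upper s))) 0 = 4 by omega]; decide
  · obtain ⟨s, hs, hc⟩ := c3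
    push Not at c4
    have hl : pvLvl (PySem.Str.upper s) = 3 := by
      unfold pvLvl; rw [if_neg (c4 s hs), if_pos hc]
    have hle := pvMem_le_foldMax xs 0 s hs
    have hub := pvFoldMax_le xs 0 3 (by norm_num) (fun t ht => by
      unfold pvLvl; rw [if_neg (c4 t ht)]; split_ifs <;> norm_num)
    rw [show xs.foldl (fun m s => max m (pvLvl (PySem.Str.upper s))) 0 = 3 by omega]; decide
  · obtain ⟨s, hs, hc⟩ := c2
    push Not at c4 c3
    have hl : pvLvl (PySem.Str.upper s) = 2 := by
      unfold pvLvl; rw [if_neg (c4 s hs), if_neg (c3 s hs), if_pos hc]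
    have hle := pvMem_le_foldMax xs 0 s hs
    have hub := pvFoldMax_le xs 0 2 (by norm_num) (fun t ht => by
      unfold pvLvl; rw [if_neg (c4 t ht), if_neg (c3 t ht)]; split_ifs <;> norm_num)
    rw [show xs.foldl (fun m s => max m (pvLvl (PySem.Str.upper s))) 0 = 2 by omega]; decide
  · obtain ⟨s, hs, hc⟩ := c1
    push Not at c4 c3 c2
    have hl : pvLvl (PySem.Str.upper s) = 1 := by
      unfold pvLvl; rw [if_neg (c4 s hs), if_neg (c3 s hs), if_neg (c2 s hs), if_pos hc]
    have hle := pvMem_le_foldMax xs 0 s hs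
    have hub := pvFoldMax_le xs 0 1 (by norm_num) (fun t ht => by
      unfold pvLvl; rw [if_neg (c4 t ht), if_neg (c3 t ht), if_neg (c2 t ht)]
      split_ifs <;> norm_num)
    rw [show xs.foldl (fun m s => max m (pvLvl (PySem.Str.upper s))) 0 = 1 by omega]; decide
  · push Not at c4 c3 c2 c1
    have hub := pvFoldMax_le xs 0 0 le_rfl (fun t ht => by
      unfold pvLvl
      rw [if_neg (c4 t ht), if_neg (c3 t ht), if_neg (c2 t ht), if_neg (c1 t ht)])
    have hle := pvLe_foldMax xs 0
    rw [show xs.foldl (fun m s => max m (pvLvl (PySem.Str.upper s))) 0 = 0 by omega]; decide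

-- ===== VERDICT (by name: the statement is the Claim_ definition above) =====
theorem determine_max_severity_py_spec : Claim_equal_determine_max_severity_py := by
  intro severities _
  unfold Spec_determine_max_severity_py determine_max_severity_py_alt
  rw [pvScanB_eq, pvA_unfold]
  have h0 : (("UNKNOWN", (0 : Int)) : String × Int) = (pvName 0, 0) := rfl
  rw [h0, pvFoldA severities 0 le_rfl]
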